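-- pv_equiv track=rewrite | github.com/SimonDamberg/AdventOfCode | 2023/day14.py | move_north
-- ===== SOURCE A (Python) =====
-- def move_north(grid):
--     moves = 0
--     for y, row in enumerate(grid):
--         if y == 0:
--             continue
--         for x, space in enumerate(row):
--             if space == "O" and grid[y-1][x] == '.':
--                 grid[y][x] = '.'
--                 grid[y-1][x] = space
--                 moves += 1
--     return moves
-- ===== SOURCE B (Python) =====
-- def move_north(grid):
--     # Pure run-based count: does not mutate grid (A mutates it in place;
--     # equivalence is about the return value).
--     moves = 0
--     n = len(grid)
--     width = 0
--     for row in grid: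
--         width = max(width, len(row))
--     for x in range(width):
--         y = 1
--         while y < n:
--             row = grid[y]
--             if x < len(row) and row[x] == "O":
--                 e = y
--                 while e + 1 < n and x < len(grid[e + 1]) and grid[e + 1][x] == "O":
--                     e += 1
--                 if x < len(grid[y - 1]) and grid[y - 1][x] == ".":
--                     moves += e - y + 1
--                 y = e + 1
--             else:
--                 y += 1
--     return moves
-- ===== Notes on version B (the rewrite author's own statement) =====
-- stated objective: alternative
-- what changed: A makes a row-major pass that mutates the grid in place, moving each rock one cell when the cell above is '.' (the mutation propagates the cascade); B never mutates: it scans each column top-down, finds each maximal contiguous run of 'O' cells, and adds the whole run length at once when the cell above the run is '.'.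
import Mathlib
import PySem

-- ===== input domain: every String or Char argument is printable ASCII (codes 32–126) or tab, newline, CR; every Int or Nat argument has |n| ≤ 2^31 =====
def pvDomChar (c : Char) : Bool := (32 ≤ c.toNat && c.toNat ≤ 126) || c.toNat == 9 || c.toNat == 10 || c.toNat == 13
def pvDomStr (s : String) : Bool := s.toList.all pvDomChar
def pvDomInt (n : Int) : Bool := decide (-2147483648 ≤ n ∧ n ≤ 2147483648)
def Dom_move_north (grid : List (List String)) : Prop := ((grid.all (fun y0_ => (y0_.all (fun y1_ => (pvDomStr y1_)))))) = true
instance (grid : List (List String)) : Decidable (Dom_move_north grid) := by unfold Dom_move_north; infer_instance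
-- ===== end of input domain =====

-- B replaces A's in-place row-major cascade by a pure column-wise scan counting whole runs of rocks
-- at once; B does not mutate grid (A mutates it in place), so the equivalence is about the return value.

-- ===== PORT A =====
-- literal transliteration of A: row-major pass over a mutating grid state, counting single-step moves
def move_north (grid : List (List String)) : Int :=
  ((List.range grid.length).foldl (fun (st : List (List String) × Int) y =>
      if y = 0 then st
      else
        (List.range ((st.1.getD y []).length)).foldl (fun (st2 : List (List String) × Int) x =>
          let G := st2.1
          let space := (G.getD y []).getD x ""
          if space = "O" ∧ (G.getD (y-1) []).getD x "" = "." then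
            let G1 := G.set y ((G.getD y []).set x ".")
            let G2 := G1.set (y-1) ((G1.getD (y-1) []).set x space)
            (G2, st2.2 + 1)
          else (G, st2.2)) st)
    (grid, 0)).2

-- ===== PORT B =====
-- B-side helper: end row of the maximal contiguous run of "O" in column x starting at row e
def pvRunEnd (g : List (List String)) (x : Nat) (e : Nat) : Nat :=
  if h : e + 1 < g.length ∧ x < (g.getD (e+1) []).length ∧ (g.getD (e+1) []).getD x "" = "O" then
    pvRunEnd g x (e+1)
  else e
termination_by g.length - e
decreasing_by omega

-- needed by pvColScan's termination proof
theorem pvRunEnd_ge (g : List (List String)) (x : Nat) (e : Nat) : e ≤ pvRunEnd g x e := by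
  unfold pvRunEnd
  split
  · exact le_trans (Nat.le_succ e) (pvRunEnd_ge g x (e+1))
  · exact le_refl e
termination_by g.length - e
decreasing_by omega

-- B-side helper: the while loop over one column (carries the running move total)
def pvColScan (g : List (List String)) (x : Nat) (y : Nat) (moves : Int) : Int :=
  if hy : y < g.length then
    if x < (g.getD y []).length ∧ (g.getD y []).getD x "" = "O" then
      pvColScan g x (pvRunEnd g x y + 1)
        (if x < (g.getD (y-1) []).length ∧ (g.getD (y-1) []).getD x "" = "." then
          moves + ((pvRunEnd g x y : Int) - (y : Int) + 1)
        else moves)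
    else pvColScan g x (y+1) moves
  else moves
termination_by g.length - y
decreasing_by
  · have := pvRunEnd_ge g x y; omega
  · omega

def move_north_alt (grid : List (List String)) : Int :=
  let width := grid.foldl (fun w row => max w row.length) 0
  (List.range width).foldl (fun moves x => pvColScan grid x 1 moves) 0

-- ===== PRECONDITION & SPEC =====
-- Pre_ excludes exactly the inputs on which Python A raises IndexError: a rock "O" in some row
-- at a column index not present in the previous (possibly shorter) row.
def Pre_move_north (grid : List (List String)) : Prop :=
  ∀ y, y < grid.length → ∀ x, x < (grid.getD y []).length →
    1 ≤ y → (grid.getD y []).getD x "" = "O" → x < (grid.getD (y-1) []).length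

instance (grid : List (List String)) : Decidable (Pre_move_north grid) := by
  unfold Pre_move_north; infer_instance

def pvWitness_move_north : List (List String) := [["O", "."], ["O", "O"], [".", "#"]]

def Spec_move_north (grid : List (List String)) (out : Int) : Prop := out = move_north_alt grid
instance (grid : List (List String)) (out : Int) : Decidable (Spec_move_north grid out) := by
  unfold Spec_move_north; infer_instance

-- ===== CLAIM (what is proved, stated in full; the proofs are below) =====
def Claim_equal_move_north : Prop :=
  ∀ (grid : List (List String)), Dom_move_north grid → Pre_move_north grid →
    Spec_move_north grid (move_north grid)

-- ===== LEMMAS AND PROOFS =====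

-- the cell (y,x) of a grid, "" when out of range (both ports read cells exactly like this)
def pvCell (g : List (List String)) (y x : Nat) : String := (g.getD y []).getD x ""

-- m(x,y): the rock at row y, column x moves during A's pass (recurrence down the ORIGINAL column)
def mcol (g : List (List String)) (x : Nat) : Nat → Bool
  | 0 => false
  | y+1 => (pvCell g (y+1) x == "O") && ((pvCell g y x == ".") || mcol g x y)

def rowCnt (g : List (List String)) (y : Nat) : Int :=
  ∑ x ∈ Finset.range ((g.getD y []).length), (if mcol g x y then (1:Int) else 0)

-- grid state after A has fully processed all rows < y
def stateCell (g : List (List String)) (y t z : Nat) : String :=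
  if y ≤ t then pvCell g t z
  else if mcol g z (t+1) = true ∧ t+1 < y then "O"
  else if mcol g z t then "." else pvCell g t z

-- grid state while A processes row y, cells with index < k already done
def innerCell (g : List (List String)) (y k t z : Nat) : String :=
  if t = y then (if z < k ∧ mcol g z y then "." else pvCell g y z)
  else if t + 1 = y then
    (if z < k ∧ mcol g z y then "O" else if mcol g z t then "." else pvCell g t z)
  else stateCell g y t z

-- A's inner-loop body and outer-loop body, by name (definitionally those of move_north)
def stepA (y : Nat) (st2 : List (List String) × Int) (x : Nat) : List (List String) × Int :=
  let G := st2.1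
  let space := (G.getD y []).getD x ""
  if space = "O" ∧ (G.getD (y-1) []).getD x "" = "." then
    let G1 := G.set y ((G.getD y []).set x ".")
    let G2 := G1.set (y-1) ((G1.getD (y-1) []).set x space)
    (G2, st2.2 + 1)
  else (G, st2.2)

def stepOut (st : List (List String) × Int) (y : Nat) : List (List String) × Int :=
  if y = 0 then st
  else (List.range ((st.1.getD y []).length)).foldl (stepA y) st

theorem move_north_eq (grid : List (List String)) :
    move_north grid = ((List.range grid.length).foldl stepOut (grid, 0)).2 := rfl

theorem getD_set' {α} (l : List α) (i j : Nat) (a d : α) :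
    (l.set i a).getD j d = if i = j ∧ i < l.length then a else l.getD j d := by
  simp only [List.getD_eq_getElem?_getD, List.getElem?_set]
  by_cases hij : i = j
  · subst hij; by_cases hi : i < l.length <;> simp [hi]
  · simp [hij]

theorem pvCell_ne_empty {g : List (List String)} {t z : Nat} (h : pvCell g t z ≠ "") :
    t < g.length ∧ z < (g.getD t []).length := by
  unfold pvCell at h
  by_cases ht : t < g.length
  · refine ⟨ht, ?_⟩
    by_cases hz : z < (g.getD t []).length
    · exact hz
    · rw [List.getD_eq_default _ _ (Nat.le_of_not_lt hz)] at h; simp at h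
  · rw [List.getD_eq_default _ _ (Nat.le_of_not_lt ht)] at h; simp at h

theorem cell_set (G : List (List String)) (y x : Nat) (s : String)
    (hy : y < G.length) (hx : x < (G.getD y []).length) (t z : Nat) :
    pvCell (G.set y ((G.getD y []).set x s)) t z =
      if t = y ∧ z = x then s else pvCell G t z := by
  unfold pvCell
  rw [getD_set']
  by_cases ht : y = t
  · subst ht
    rw [if_pos ⟨rfl, hy⟩, getD_set']
    by_cases hz : x = z
    · subst hz; rw [if_pos ⟨rfl, hx⟩, if_pos ⟨rfl, rfl⟩]
    · rw [if_neg (by tauto), if_neg (by tauto)]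
  · rw [if_neg (by tauto), if_neg (by tauto)]

theorem len_set (G : List (List String)) (y x : Nat) (s : String) :
    (G.set y ((G.getD y []).set x s)).length = G.length := by
  simp

theorem rowlen_set (G : List (List String)) (y x : Nat) (s : String) (t : Nat) :
    ((G.set y ((G.getD y []).set x s)).getD t []).length = (G.getD t []).length := by
  rw [getD_set']
  by_cases h : y = t ∧ y < G.length
  · rw [if_pos h, List.length_set, h.1]
  · rw [if_neg h]

theorem mcol_lt {g : List (List String)} {x y : Nat} (h : mcol g x y = true) :
    y < g.length ∧ x < (g.getD y []).length ∧ pvCell g y x = "O" := by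
  cases y with
  | zero => simp [mcol] at h
  | succ n =>
    simp only [mcol, Bool.and_eq_true, beq_iff_eq] at h
    have := pvCell_ne_empty (g := g) (t := n+1) (z := x) (by rw [h.1]; decide)
    exact ⟨this.1, this.2, h.1⟩

theorem mcol_false_of_not_O {g : List (List String)} {x y : Nat} (h : pvCell g y x ≠ "O") :
    mcol g x y = false := by
  cases y with
  | zero => rfl
  | succ n => simp only [mcol, Bool.and_eq_false_iff, beq_eq_false_iff_ne]; left; exact h

-- condition read by A's inner body ↔ mcol
theorem cond_iff (g : List (List String)) (y k : Nat) (hy : 1 ≤ y) :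
    (pvCell g y k = "O" ∧ (if mcol g k (y-1) then "." else pvCell g (y-1) k) = ".")
      ↔ mcol g k y = true := by
  cases y with
  | zero => omega
  | succ n =>
    simp only [Nat.succ_sub_one, mcol, Bool.and_eq_true, Bool.or_eq_true, beq_iff_eq]
    by_cases hm : mcol g k n = true <;> simp [hm]

theorem innerCell_zero (g : List (List String)) (y : Nat) (t z : Nat) :
    innerCell g y 0 t z = stateCell g y t z := by
  unfold innerCell stateCell
  split_ifs <;> first | rfl | omega | simp_all

theorem innerCell_top (g : List (List String)) (y k : Nat) (hy : 1 ≤ y)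
    (hk : (g.getD y []).length ≤ k) (t z : Nat) :
    innerCell g y k t z = stateCell g (y+1) t z := by
  have hzk : mcol g z y = true → z < k := fun h => lt_of_lt_of_le (mcol_lt h).2.1 hk
  unfold innerCell stateCell
  split_ifs
  all_goals try rfl
  all_goals try omega
  all_goals try simp_all
  all_goals omega

theorem innerCell_succ_true (g : List (List String)) {y k : Nat} (hy : 1 ≤ y)
    (hm : mcol g k y = true) (t z : Nat) :
    innerCell g y (k+1) t z =
      if t + 1 = y ∧ z = k then "O"
      else if t = y ∧ z = k then "." else innerCell g y k t z := by
  have hzk : z < k + 1 ↔ z < k ∨ z = k := by omega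
  unfold innerCell
  split_ifs
  all_goals try rfl
  all_goals try omega
  all_goals try simp_all
  all_goals omega

theorem innerCell_succ_false (g : List (List String)) {y k : Nat}
    (hm : mcol g k y = false) (t z : Nat) :
    innerCell g y (k+1) t z = innerCell g y k t z := by
  unfold innerCell
  have hiff : (z < k + 1 ∧ mcol g z y = true) ↔ (z < k ∧ mcol g z y = true) := by
    constructor
    · rintro ⟨h1, h2⟩
      refine ⟨?_, h2⟩
      rcases Nat.lt_succ_iff_lt_or_eq.mp h1 with h | h
      · exact h
      · subst h; rw [hm] at h2; cases h2
    · rintro ⟨h1, h2⟩; exact ⟨by omega, h2⟩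
  by_cases ht : t = y
  · rw [if_pos ht, if_pos ht]
    by_cases h1 : z < k ∧ mcol g z y = true
    · rw [if_pos (hiff.mpr h1), if_pos h1]
    · rw [if_neg (fun hc => h1 (hiff.mp hc)), if_neg h1]
  · rw [if_neg ht, if_neg ht]
    by_cases ht1 : t + 1 = y
    · rw [if_pos ht1, if_pos ht1]
      by_cases h1 : z < k ∧ mcol g z y = true
      · rw [if_pos (hiff.mpr h1), if_pos h1]
      · rw [if_neg (fun hc => h1 (hiff.mp hc)), if_neg h1]
    · rw [if_neg ht1, if_neg ht1]

theorem stateCell_zero_one (g : List (List String)) (t z : Nat) :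
    stateCell g 0 t z = stateCell g 1 t z := by
  unfold stateCell
  rw [if_pos (Nat.zero_le t)]
  by_cases h1 : 1 ≤ t
  · rw [if_pos h1]
  · have ht : t = 0 := by omega
    subst ht
    rw [if_neg (by omega), if_neg (by rintro ⟨_, h2⟩; omega)]
    show pvCell g 0 z = if mcol g z 0 then "." else pvCell g 0 z
    rfl

theorem rowCnt_zero (g : List (List String)) : rowCnt g 0 = 0 := by
  unfold rowCnt
  simp [mcol]

-- invariant of A's inner loop
def InvA (g : List (List String)) (y k : Nat) (G : List (List String)) : Prop :=
  G.length = g.length ∧ (∀ t, (G.getD t []).length = (g.getD t []).length) ∧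
    (∀ t z, pvCell G t z = innerCell g y k t z)

theorem innerA (g : List (List String)) (y : Nat) (hy : 1 ≤ y) :
    ∀ (m k : Nat) (G : List (List String)) (c : Int), InvA g y k G →
      InvA g y (k+m) ((List.range' k m).foldl (stepA y) (G, c)).1 ∧
      ((List.range' k m).foldl (stepA y) (G, c)).2 =
        c + ∑ x ∈ Finset.Ico k (k+m), (if mcol g x y then (1:Int) else 0) := by
  intro m
  induction m with
  | zero =>
    intro k G c hInv
    constructor
    · simpa using hInv
    · simp
  | succ m ih =>
    intro k G c hInv
    obtain ⟨hG1, hG2, hG3⟩ := hInv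
    rw [List.range'_succ, List.foldl_cons]
    have hspace : (G.getD y []).getD k "" = pvCell g y k := by
      have h := hG3 y k
      unfold innerCell at h
      rw [if_pos rfl, if_neg (by rintro ⟨h1, _⟩; omega)] at h
      exact h
    have hprev : (G.getD (y-1) []).getD k "" = (if mcol g k (y-1) then "." else pvCell g (y-1) k) := by
      have h := hG3 (y-1) k
      unfold innerCell at h
      rw [if_neg (by omega), if_pos (by omega), if_neg (by rintro ⟨h1, _⟩; omega)] at h
      exact h
    by_cases hm : mcol g k y = true
    · obtain ⟨hcO, hcD⟩ := (cond_iff g y k hy).mpr hm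
      have hyG : y < G.length := hG1 ▸ (mcol_lt hm).1
      have hkG : k < (G.getD y []).length := by rw [hG2 y]; exact (mcol_lt hm).2.1
      have hstep : stepA y (G, c) k =
          ((G.set y ((G.getD y []).set k ".")).set (y-1)
             (((G.set y ((G.getD y []).set k ".")).getD (y-1) []).set k ((G.getD y []).getD k "")),
           c + 1) := by
        simp only [stepA]
        rw [if_pos ⟨by rw [hspace]; exact hcO, by rw [hprev]; exact hcD⟩]
      have hcell1 : ∀ t z, pvCell (G.set y ((G.getD y []).set k ".")) t z =
          if t = y ∧ z = k then "." else pvCell G t z := cell_set G y k "." hyG hkG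
      have hdot1 : pvCell (G.set y ((G.getD y []).set k ".")) (y-1) k = "." := by
        rw [hcell1, if_neg (by rintro ⟨h1, _⟩; omega)]
        show (G.getD (y-1) []).getD k "" = "."
        rw [hprev]
        exact hcD
      have hr1 := pvCell_ne_empty (g := G.set y ((G.getD y []).set k "."))
        (t := y-1) (z := k) (by rw [hdot1]; decide)
      have hcell2 := cell_set (G.set y ((G.getD y []).set k ".")) (y-1) k
        ((G.getD y []).getD k "") hr1.1 hr1.2
      have hInv' : InvA g y (k+1)
          ((G.set y ((G.getD y []).set k ".")).set (y-1)
             (((G.set y ((G.getD y []).set k ".")).getD (y-1) []).set k ((G.getD y []).getD k ""))) := by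
        refine ⟨?_, ?_, ?_⟩
        · rw [len_set, len_set]; exact hG1
        · intro t; rw [rowlen_set, rowlen_set]; exact hG2 t
        · intro t z
          rw [hcell2, hcell1, innerCell_succ_true g hy hm t z]
          have hv : (G.getD y []).getD k "" = "O" := by rw [hspace]; exact hcO
          rw [hv]
          by_cases h1 : t = y-1 ∧ z = k
          · rw [if_pos h1, if_pos (show t+1 = y ∧ z = k from ⟨by omega, h1.2⟩)]
          · rw [if_neg h1, if_neg (show ¬(t+1 = y ∧ z = k) from fun hc => h1 ⟨by omega, hc.2⟩)]
            by_cases h2 : t = y ∧ z = k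
            · rw [if_pos h2, if_pos h2]
            · rw [if_neg h2, if_neg h2, hG3]
      have hres := ih (k+1) _ (c+1) hInv'
      rw [hstep]
      constructor
      · rw [show k+(m+1) = k+1+m from by omega]
        exact hres.1
      · rw [hres.2, Finset.sum_eq_sum_Ico_succ_bot (by omega : k < k+(m+1))]
        simp only [hm, if_true]
        rw [show k+(m+1) = k+1+m from by omega]
        ring
    · have hmf : mcol g k y = false := by revert hm; cases mcol g k y <;> simp
      have hcond : ¬((G.getD y []).getD k "" = "O" ∧ (G.getD (y-1) []).getD k "" = ".") := by
        rw [hspace, hprev]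
        intro hc
        exact hm ((cond_iff g y k hy).mp hc)
      have hstep : stepA y (G, c) k = (G, c) := by
        simp only [stepA]
        rw [if_neg hcond]
      have hInv' : InvA g y (k+1) G :=
        ⟨hG1, hG2, fun t z => by rw [hG3, innerCell_succ_false g hmf]⟩
      have hres := ih (k+1) G c hInv'
      rw [hstep]
      constructor
      · rw [show k+(m+1) = k+1+m from by omega]
        exact hres.1
      · rw [hres.2, Finset.sum_eq_sum_Ico_succ_bot (by omega : k < k+(m+1))]
        rw [show k+(m+1) = k+1+m from by omega]
        simp [hmf]

def InvO (g : List (List String)) (y : Nat) (G : List (List String)) : Prop :=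
  G.length = g.length ∧ (∀ t, (G.getD t []).length = (g.getD t []).length) ∧
    (∀ t z, pvCell G t z = stateCell g y t z)

theorem outerA (g : List (List String)) :
    ∀ (m y : Nat) (G : List (List String)) (c : Int), InvO g y G →
      ((List.range' y m).foldl stepOut (G, c)).2 =
        c + ∑ y' ∈ Finset.Ico y (y+m), rowCnt g y' := by
  intro m
  induction m with
  | zero => intro y G c _; simp
  | succ m ih =>
    intro y G c hInv
    obtain ⟨hG1, hG2, hG3⟩ := hInv
    rw [List.range'_succ, List.foldl_cons]
    by_cases hy0 : y = 0
    · subst hy0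
      have hstep : stepOut (G, c) 0 = (G, c) := by unfold stepOut; rw [if_pos rfl]
      rw [hstep, ih 1 G c ⟨hG1, hG2, fun t z => by rw [hG3, stateCell_zero_one]⟩,
        show (0:Nat)+(m+1) = 1+m from by omega,
        Finset.sum_eq_sum_Ico_succ_bot (show (0:Nat) < 1+m from by omega) (fun y' => rowCnt g y'),
        rowCnt_zero]
      norm_num
    · have hy : 1 ≤ y := by omega
      have hstep : stepOut (G, c) y = (List.range ((G.getD y []).length)).foldl (stepA y) (G, c) := by
        unfold stepOut; rw [if_neg hy0]
      rw [hstep, hG2 y, List.range_eq_range']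
      have hInvA : InvA g y 0 G := ⟨hG1, hG2, fun t z => by rw [hG3, ← innerCell_zero]⟩
      obtain ⟨hI, hC⟩ := innerA g y hy ((g.getD y []).length) 0 G c hInvA
      obtain ⟨hI1, hI2, hI3⟩ := hI
      have hInvO : InvO g (y+1) ((List.range' 0 ((g.getD y []).length)).foldl (stepA y) (G, c)).1 := by
        refine ⟨hI1, hI2, fun t z => ?_⟩
        rw [hI3 t z]
        exact innerCell_top g y (0 + (g.getD y []).length) hy (by omega) t z
      have hC' : ((List.range' 0 ((g.getD y []).length)).foldl (stepA y) (G, c)).2 = c + rowCnt g y := by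
        rw [hC]
        unfold rowCnt
        rw [Finset.range_eq_Ico, Nat.zero_add]
      have h2 := ih (y+1) ((List.range' 0 ((g.getD y []).length)).foldl (stepA y) (G, c)).1
        ((List.range' 0 ((g.getD y []).length)).foldl (stepA y) (G, c)).2 hInvO
      rw [Prod.mk.eta] at h2
      rw [h2, hC',
        Finset.sum_eq_sum_Ico_succ_bot (show y < y+(m+1) from by omega) (fun y' => rowCnt g y'),
        show y+(m+1) = y+1+m from by omega]
      ring

theorem A_total (g : List (List String)) :
    move_north g = ∑ y ∈ Finset.range g.length, rowCnt g y := by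
  rw [move_north_eq, List.range_eq_range']
  have h := outerA g g.length 0 g 0
    ⟨rfl, fun t => rfl, fun t z => by unfold stateCell; rw [if_pos (Nat.zero_le t)]⟩
  rw [h, Finset.range_eq_Ico]
  norm_num

-- ===== B side =====

theorem pvRunEnd_lt (g : List (List String)) (x y : Nat) (h : y < g.length) :
    pvRunEnd g x y < g.length := by
  unfold pvRunEnd
  split
  · next h' => exact pvRunEnd_lt g x (y+1) h'.1
  · exact h
termination_by g.length - y
decreasing_by omega

theorem pvRunEnd_run (g : List (List String)) (x y : Nat) :
    ∀ t, y < t → t ≤ pvRunEnd g x y → pvCell g t x = "O" := by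
  unfold pvRunEnd
  split
  · next h' =>
    intro t h1 h2
    by_cases ht : y + 1 < t
    · exact pvRunEnd_run g x (y+1) t ht h2
    · have : t = y + 1 := by omega
      subst this; exact h'.2.2
  · intro t h1 h2; omega
termination_by g.length - y
decreasing_by omega

theorem pvRunEnd_stop (g : List (List String)) (x y : Nat) :
    pvCell g (pvRunEnd g x y + 1) x ≠ "O" := by
  unfold pvRunEnd
  split
  · exact pvRunEnd_stop g x (y+1)
  · next h' =>
    intro hc
    have hr := pvCell_ne_empty (g := g) (t := y+1) (z := x) (by rw [hc]; decide)
    exact h' ⟨hr.1, hr.2, hc⟩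
termination_by g.length - y
decreasing_by omega

theorem mcol_run (g : List (List String)) (x y e : Nat) (hy : 1 ≤ y)
    (h0 : mcol g x (y-1) = false) (hO : ∀ t, y ≤ t → t ≤ e → pvCell g t x = "O") :
    ∀ t, y ≤ t → t ≤ e → mcol g x t = (pvCell g (y-1) x == ".") := by
  intro t
  induction t with
  | zero => intro h1 _; omega
  | succ n ihn =>
    intro h1 h2
    by_cases hb : y = n + 1
    · have hn : y - 1 = n := by omega
      have h0' : mcol g x n = false := by rwa [hn] at h0
      have hcy : pvCell g (n+1) x = "O" := hO (n+1) (by omega) h2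
      rw [hn]
      simp [mcol, hcy, h0']
    · have hyn : y ≤ n := by omega
      have hcn : pvCell g n x = "O" := hO n hyn (by omega)
      have hind := ihn hyn (by omega)
      simp only [mcol, hO (n+1) (by omega) h2, hcn, hind]
      simp

theorem colScan_eq (g : List (List String)) (x : Nat) :
    ∀ (m y : Nat) (c : Int), 1 ≤ y → g.length ≤ y + m →
      (pvCell g y x = "O" → mcol g x (y-1) = false) →
      pvColScan g x y c = c + ∑ t ∈ Finset.Ico y g.length, (if mcol g x t then (1:Int) else 0) := by
  intro m
  induction m with
  | zero =>
    intro y c hy hm _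
    unfold pvColScan
    rw [dif_neg (by omega), Finset.Ico_eq_empty (by omega)]
    simp
  | succ m ih =>
    intro y c hy hm hinv
    unfold pvColScan
    by_cases hyn : y < g.length
    · rw [dif_pos hyn]
      by_cases hO : pvCell g y x = "O"
      · have hr := pvCell_ne_empty (g := g) (t := y) (z := x) (by rw [hO]; decide)
        rw [if_pos ⟨hr.2, hO⟩]
        have hey : y ≤ pvRunEnd g x y := pvRunEnd_ge g x y
        have hel : pvRunEnd g x y < g.length := pvRunEnd_lt g x y hyn
        have hrun : ∀ t, y ≤ t → t ≤ pvRunEnd g x y → pvCell g t x = "O" := by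
          intro t h1 h2
          rcases Nat.eq_or_lt_of_le h1 with h | h
          · rw [← h]; exact hO
          · exact pvRunEnd_run g x y t h h2
        have hstop : pvCell g (pvRunEnd g x y + 1) x ≠ "O" := pvRunEnd_stop g x y
        have h0 : mcol g x (y-1) = false := hinv hO
        have hmr := mcol_run g x y (pvRunEnd g x y) hy h0 hrun
        have hrec := ih (pvRunEnd g x y + 1)
        have hsplit : ∑ t ∈ Finset.Ico y g.length, (if mcol g x t then (1:Int) else 0) =
            (∑ t ∈ Finset.Ico y (pvRunEnd g x y + 1), (if mcol g x t then (1:Int) else 0)) +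
              ∑ t ∈ Finset.Ico (pvRunEnd g x y + 1) g.length, (if mcol g x t then (1:Int) else 0) :=
          (Finset.sum_Ico_consecutive _ (by omega) (by omega)).symm
        have hconst : ∑ t ∈ Finset.Ico y (pvRunEnd g x y + 1), (if mcol g x t then (1:Int) else 0) =
            (if pvCell g (y-1) x = "." then ((pvRunEnd g x y + 1 - y : Nat) : Int) else 0) := by
          have hterm : ∀ t ∈ Finset.Ico y (pvRunEnd g x y + 1),
              (if mcol g x t then (1:Int) else 0) = (if pvCell g (y-1) x = "." then (1:Int) else 0) := by
            intro t ht
            rw [Finset.mem_Ico] at ht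
            rw [hmr t ht.1 (by omega)]
            by_cases hd : pvCell g (y-1) x = "." <;> simp [hd]
          rw [Finset.sum_congr rfl hterm, Finset.sum_const, Nat.card_Ico]
          by_cases hd : pvCell g (y-1) x = "." <;> simp [hd]
        by_cases hd : pvCell g (y-1) x = "."
        · have hdr := pvCell_ne_empty (g := g) (t := y-1) (z := x) (by rw [hd]; decide)
          rw [if_pos ⟨hdr.2, hd⟩,
            hrec _ (by omega) (by omega) (fun hc => absurd hc hstop),
            hsplit, hconst, if_pos hd]
          push_cast [Nat.cast_sub (by omega : y ≤ pvRunEnd g x y + 1)]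
          ring
        · rw [if_neg (fun hc => hd hc.2),
            hrec _ (by omega) (by omega) (fun hc => absurd hc hstop),
            hsplit, hconst, if_neg hd]
          ring
      · rw [if_neg (fun hc => hO hc.2)]
        have h0 : mcol g x y = false := mcol_false_of_not_O hO
        rw [ih (y+1) c (by omega) (by omega) (fun _ => by simpa using h0),
          Finset.sum_eq_sum_Ico_succ_bot hyn]
        simp [h0]
    · rw [dif_neg hyn, Finset.Ico_eq_empty (by omega)]
      simp

theorem foldl_max_init (l : List (List String)) : ∀ w, w ≤ l.foldl (fun a r => max a r.length) w := by
  induction l with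
  | nil => intro w; simp
  | cons r l ihl =>
    intro w
    rw [List.foldl_cons]
    exact le_trans (le_max_left w r.length) (ihl (max w r.length))

theorem foldl_max_mem (l : List (List String)) : ∀ (w : Nat) (r), r ∈ l →
    r.length ≤ l.foldl (fun a r => max a r.length) w := by
  induction l with
  | nil => intro w r h; simp at h
  | cons a l ihl =>
    intro w r h
    rw [List.foldl_cons]
    rcases List.mem_cons.mp h with h | h
    · rw [h]
      exact le_trans (le_max_right w a.length) (foldl_max_init l (max w a.length))
    · exact ihl (max w a.length) r h

-- ===== bridge =====

theorem foldB (g : List (List String)) : ∀ (l : List Nat) (c : Int),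
    l.foldl (fun moves x => pvColScan g x 1 moves) c =
      c + (l.map (fun x => ∑ t ∈ Finset.Ico 1 g.length, (if mcol g x t then (1:Int) else 0))).sum := by
  intro l
  induction l with
  | nil => intro c; simp
  | cons a l ihl =>
    intro c
    rw [List.foldl_cons, ihl, List.map_cons, List.sum_cons,
      colScan_eq g a g.length 1 c le_rfl (by omega) (fun _ => rfl)]
    ring

theorem map_range_sum (f : Nat → Int) : ∀ W, ((List.range W).map f).sum = ∑ x ∈ Finset.range W, f x := by
  intro W
  induction W with
  | zero => simp
  | succ W ih =>
    rw [List.range_succ, List.map_append, List.sum_append, Finset.sum_range_succ, ih]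
    simp

theorem B_total (g : List (List String)) :
    move_north_alt g = ∑ x ∈ Finset.range (g.foldl (fun w row => max w row.length) 0),
      ∑ t ∈ Finset.Ico 1 g.length, (if mcol g x t then (1:Int) else 0) := by
  have h1 : move_north_alt g = (List.range (g.foldl (fun w row => max w row.length) 0)).foldl
      (fun moves x => pvColScan g x 1 moves) 0 := rfl
  rw [h1, foldB, map_range_sum]
  simp

theorem bridge (g : List (List String)) :
    ∑ y ∈ Finset.range g.length, rowCnt g y =
      ∑ x ∈ Finset.range (g.foldl (fun w row => max w row.length) 0),
        ∑ t ∈ Finset.Ico 1 g.length, (if mcol g x t then (1:Int) else 0) := by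
  have hW : ∀ y, y < g.length → (g.getD y []).length ≤ g.foldl (fun w row => max w row.length) 0 := by
    intro y hy
    have hmem : g.getD y [] ∈ g := by
      rw [List.getD_eq_getElem g [] hy]
      exact List.getElem_mem hy
    exact foldl_max_mem g 0 _ hmem
  calc ∑ y ∈ Finset.range g.length, rowCnt g y
      = ∑ y ∈ Finset.range g.length,
          ∑ x ∈ Finset.range (g.foldl (fun w row => max w row.length) 0),
            (if mcol g x y then (1:Int) else 0) := by
        refine Finset.sum_congr rfl (fun y hy => ?_)
        unfold rowCnt
        have hsub : Finset.range ((g.getD y []).length) ⊆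
            Finset.range (g.foldl (fun w row => max w row.length) 0) := by
          intro a ha
          rw [Finset.mem_range] at ha ⊢
          exact lt_of_lt_of_le ha (hW y (Finset.mem_range.mp hy))
        refine Finset.sum_subset hsub ?_
        intro x _ hx
        have hm : mcol g x y = false := by
          by_contra hc
          have hc' : mcol g x y = true := by revert hc; cases mcol g x y <;> simp
          exact hx (Finset.mem_range.mpr (mcol_lt hc').2.1)
        simp [hm]
    _ = ∑ x ∈ Finset.range (g.foldl (fun w row => max w row.length) 0),
          ∑ y ∈ Finset.range g.length, (if mcol g x y then (1:Int) else 0) := Finset.sum_comm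
    _ = ∑ x ∈ Finset.range (g.foldl (fun w row => max w row.length) 0),
          ∑ t ∈ Finset.Ico 1 g.length, (if mcol g x t then (1:Int) else 0) := by
        refine Finset.sum_congr rfl (fun x _ => ?_)
        rw [Finset.range_eq_Ico]
        by_cases hn : 0 < g.length
        · rw [Finset.sum_eq_sum_Ico_succ_bot hn]
          simp [mcol]
        · have h0 : g.length = 0 := by omega
          rw [h0]
          simp

-- ===== VERDICT (by name: the statement is the Claim_ definition above) =====
theorem move_north_spec : Claim_equal_move_north := by
  intro grid _ _
  unfold Spec_move_north
  rw [A_total, B_total, bridge]
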